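-- pv_equiv track=rewrite | github.com/mckirk/adventofcode | 2024py/day22/part2.py | stepn
-- ===== SOURCE A (Python) =====
-- MOD = 16777216
--
-- def step(x):
--     x = (x^(x << 6)) % MOD
--     x = (x^(x >> 5)) % MOD
--     x = (x^(x << 11)) % MOD
--     return x
--
-- def stepn(x, n):
--     deltas = []
--     prices_by_seq = dict()
--     for _ in range(n):
--         p = x % 10
--         x = step(x)
--         np = x % 10
--         deltas.append(np-p)
--         if len(deltas) >= 4:
--             seq = tuple(deltas[-4:])
--             if seq not in prices_by_seq:
--                 prices_by_seq[seq] = np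
--     return prices_by_seq
-- ===== SOURCE B (Python) =====
-- MOD = 16777216
--
-- def step(x):
--     x = (x^(x << 6)) % MOD
--     x = (x^(x >> 5)) % MOD
--     x = (x^(x << 11)) % MOD
--     return x
--
-- def stepn(x, n):
--     # phase 1: materialize every price, every delta, and every (window, next-price) pair
--     prices = [x % 10]
--     for _ in range(n):
--         x = step(x)
--         prices.append(x % 10)
--     deltas = [prices[i + 1] - prices[i] for i in range(n)]
--     pairs = [((deltas[i], deltas[i + 1], deltas[i + 2], deltas[i + 3]), prices[i + 4])
--              for i in range(n - 3)]
--     # phase 2: backward overwrite pass -- afterwards first[s] is s's earliest window index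
--     first = {}
--     for i, (s, _) in reversed(list(enumerate(pairs))):
--         first[s] = i
--     # phase 3: keep exactly the pairs sitting at their window's first-occurrence index
--     out = {}
--     for i, (s, p) in enumerate(pairs):
--         if first[s] == i:
--             out[s] = p
--     return out
-- ===== Notes on version B (the rewrite author's own statement) =====
-- stated objective: alternative
-- what changed: A streams once, keeping a seen-dict and inserting a window's price only if the window is absent; B materializes all (window, next-price) pairs, computes each window's first-occurrence index by a backward overwrite pass over the pairs, then emits exactly the pairs whose position equals their window's first index.
import Mathlib
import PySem

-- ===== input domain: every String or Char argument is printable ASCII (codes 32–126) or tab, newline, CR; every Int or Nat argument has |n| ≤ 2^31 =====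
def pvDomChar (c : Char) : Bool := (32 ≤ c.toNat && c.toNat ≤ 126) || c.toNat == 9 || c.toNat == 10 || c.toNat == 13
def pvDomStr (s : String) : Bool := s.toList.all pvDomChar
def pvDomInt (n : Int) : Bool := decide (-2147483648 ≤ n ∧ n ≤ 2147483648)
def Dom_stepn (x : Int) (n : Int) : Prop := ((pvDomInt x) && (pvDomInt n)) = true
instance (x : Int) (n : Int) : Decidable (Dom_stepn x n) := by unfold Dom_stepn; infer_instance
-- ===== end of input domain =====

-- B replaces A's streaming insert-if-absent dict by: materialize all (window, next-price) pairs, find each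
-- window's first index by a backward overwrite pass, then keep the pairs sitting at their window's first index.

-- ===== PORT A =====
def stepA (x : Int) : Int :=
  let x1 := PySem.Int.mod (PySem.Int.bxor x (x <<< (6 : Nat))) 16777216
  let x2 := PySem.Int.mod (PySem.Int.bxor x1 (x1 >>> (5 : Nat))) 16777216
  PySem.Int.mod (PySem.Int.bxor x2 (x2 <<< (11 : Nat))) 16777216

def stepn (x : Int) (n : Int) : List (List Int × Int) :=
  let s := (PySem.List.pyRange 0 n 1).foldl
    (fun (st : Int × List Int × PySem.Dict (List Int) Int) _ =>
      let p := PySem.Int.mod st.1 10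
      let x := stepA st.1
      let np := PySem.Int.mod x 10
      let deltas := st.2.1 ++ [np - p]
      let pbs :=
        if 4 ≤ deltas.length then
          let seq := PySem.List.slice deltas (some (-4)) none
          if (st.2.2).contains seq then st.2.2 else (st.2.2).insert seq np
        else st.2.2
      (x, deltas, pbs))
    (x, ([] : List Int), (PySem.Dict.empty : PySem.Dict (List Int) Int))
  s.2.2.items

-- ===== PORT B =====
def stepB (x : Int) : Int :=
  let x1 := PySem.Int.mod (PySem.Int.bxor x (x <<< (6 : Nat))) 16777216
  let x2 := PySem.Int.mod (PySem.Int.bxor x1 (x1 >>> (5 : Nat))) 16777216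
  PySem.Int.mod (PySem.Int.bxor x2 (x2 <<< (11 : Nat))) 16777216

def stepn_alt (x : Int) (n : Int) : List (List Int × Int) :=
  -- phase 1: materialize every price, every delta, and every (window, next-price) pair
  let s := (PySem.List.pyRange 0 n 1).foldl
    (fun (st : Int × List Int) _ =>
      let x := stepB st.1
      (x, st.2 ++ [PySem.Int.mod x 10]))
    (x, [PySem.Int.mod x 10])
  let prices := s.2
  let deltas := (PySem.List.pyRange 0 n 1).map
    (fun i => PySem.List.pyGetD prices (i + 1) 0 - PySem.List.pyGetD prices i 0)
  let pairs := (PySem.List.pyRange 0 (n - 3) 1).map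
    (fun i => ([PySem.List.pyGetD deltas i 0, PySem.List.pyGetD deltas (i + 1) 0,
                PySem.List.pyGetD deltas (i + 2) 0, PySem.List.pyGetD deltas (i + 3) 0],
               PySem.List.pyGetD prices (i + 4) 0))
  -- phase 2: backward overwrite pass — afterwards first[s] is s's earliest window index
  let first := (PySem.List.enumerate pairs 0).reverse.foldl
    (fun (d : PySem.Dict (List Int) Int) q => d.insert q.2.1 q.1)
    (PySem.Dict.empty : PySem.Dict (List Int) Int)
  -- phase 3: keep exactly the pairs sitting at their window's first-occurrence index
  -- (Python's 'first[s] == i' is ported as 'first.get? s == some i': the key s is always present,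
  --  so the KeyError branch of 'first[s]' is unreachable and get? is exact here)
  let out := (PySem.List.enumerate pairs 0).foldl
    (fun (d : PySem.Dict (List Int) Int) q =>
      if first.get? q.2.1 == some q.1 then d.insert q.2.1 q.2.2 else d)
    (PySem.Dict.empty : PySem.Dict (List Int) Int)
  out.items

-- ===== PRECONDITION & SPEC =====
def Spec_stepn (x : Int) (n : Int) (out : List (List Int × Int)) : Prop := out = stepn_alt x n
instance (x : Int) (n : Int) (out : List (List Int × Int)) : Decidable (Spec_stepn x n out) := by unfold Spec_stepn; infer_instance

-- ===== CLAIM (what is proved, stated in full; the proofs are below) =====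
def Claim_equal_stepn : Prop := ∀ (x : Int) (n : Int), Dom_stepn x n → Spec_stepn x n (stepn x n)


-- ===== LEMMAS AND PROOFS =====

-- the PRNG iterated k times, and the derived price / delta / window sequences
def pvX (x : Int) : Nat → Int
  | 0 => x
  | k+1 => stepA (pvX x k)

def pvPrice (x : Int) (k : Nat) : Int := PySem.Int.mod (pvX x k) 10

def pvD (x : Int) (k : Nat) : Int := pvPrice x (k+1) - pvPrice x k

def pvDts (x : Int) (m : Nat) : List Int := (List.range m).map (pvD x)

def pvSeq (x : Int) (k : Nat) : List Int := [pvD x (k-3), pvD x (k-2), pvD x (k-1), pvD x k]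

def pvPair (x : Int) (j : Nat) : List Int × Int := (pvSeq x (j+3), pvPrice x (j+4))

def pvPairs (x : Int) (m : Nat) : List (List Int × Int) := (List.range (m-3)).map (pvPair x)

-- the common dictionary update at loop index k (A's body from index 3 on)
def pvUp (x : Int) (d : PySem.Dict (List Int) Int) (k : Nat) : PySem.Dict (List Int) Int :=
  if 3 <= k then
    (if d.contains (pvSeq x k) then d else d.insert (pvSeq x k) (pvPrice x (k+1)))
  else d

-- insert-if-absent, A's dict update per pair
def pvIia (d : PySem.Dict (List Int) Int) (p : List Int × Int) : PySem.Dict (List Int) Int :=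
  if d.contains p.1 then d else d.insert p.1 p.2

-- canonical first-occurrence dedup of a pair list, given the keys already seen
def pvKeep (seen : List (List Int)) : List (List Int × Int) → List (List Int × Int)
  | [] => []
  | p :: t => if p.1 ∈ seen then pvKeep seen t else p :: pvKeep (seen ++ [p.1]) t

-- A's loop body and B's phase-1 loop body, as functions of the state only
def pvGA : (Int × List Int × PySem.Dict (List Int) Int) → (Int × List Int × PySem.Dict (List Int) Int) :=
  fun st =>
    let p := PySem.Int.mod st.1 10
    let x := stepA st.1
    let np := PySem.Int.mod x 10
    let deltas := st.2.1 ++ [np - p]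
    let pbs :=
      if 4 <= deltas.length then
        let seq := PySem.List.slice deltas (some (-4)) none
        if (st.2.2).contains seq then st.2.2 else (st.2.2).insert seq np
      else st.2.2
    (x, deltas, pbs)

def pvGB : (Int × List Int) → (Int × List Int) :=
  fun st =>
    let x := stepB st.1
    (x, st.2 ++ [PySem.Int.mod x 10])

lemma foldl_iterate {α S : Type} (g : S → S) (l : List α) :
    ∀ s, l.foldl (fun a _ => g a) s = g^[l.length] s := by
  induction l with
  | nil => intro s; rfl
  | cons h t ih =>
    intro s
    simp [List.foldl_cons, ih, Function.iterate_succ_apply]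

lemma drop_window (x : Int) (k : Nat) (hk : 3 <= k) :
    (pvDts x (k+1)).drop (k-3) = pvSeq x k := by
  have h4 : k + 1 = (k-3) + 4 := by omega
  rw [pvDts, h4, List.range_add, List.map_append]
  rw [List.drop_append_of_le_length (by simp)]
  rw [List.drop_eq_nil_of_le (by simp), List.nil_append]
  simp [List.range_succ]
  have h1 : k - 3 + 1 = k - 2 := by omega
  have h2 : k - 3 + 2 = k - 1 := by omega
  have h3 : k - 3 + 3 = k := by omega
  rw [h1, h2, h3]
  rfl

lemma A_iter (x : Int) : ∀ k,
    pvGA^[k] (x, ([] : List Int), (PySem.Dict.empty : PySem.Dict (List Int) Int))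
      = (pvX x k, pvDts x k, (List.range k).foldl (pvUp x) PySem.Dict.empty) := by
  intro k
  induction k with
  | zero => rfl
  | succ k ih =>
    rw [Function.iterate_succ_apply', ih]
    show pvGA _ = _
    rw [pvGA]
    have hdts : pvDts x k ++ [PySem.Int.mod (stepA (pvX x k)) 10 - PySem.Int.mod (pvX x k) 10]
        = pvDts x (k+1) := by
      rw [pvDts, pvDts, List.range_succ, List.map_append]
      rfl
    simp only [hdts]
    have hlen : (pvDts x (k+1)).length = k + 1 := by simp [pvDts]
    by_cases hk : 3 <= k
    · rw [if_pos (by omega : 4 <= (pvDts x (k+1)).length)]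
      rw [PySem.List.slice_from_neg_ofNat _ 4 (by omega)]
      rw [hlen]
      have h34 : k + 1 - 4 = k - 3 := by omega
      rw [h34, drop_window x k hk]
      rw [List.range_succ, List.foldl_append, List.foldl_cons, List.foldl_nil]
      rw [pvUp, if_pos hk]
      rfl
    · rw [if_neg (by omega : ¬ 4 <= (pvDts x (k+1)).length)]
      rw [List.range_succ, List.foldl_append, List.foldl_cons, List.foldl_nil]
      rw [pvUp, if_neg hk]
      rfl

lemma B_iter (x : Int) : ∀ k,
    pvGB^[k] (x, [PySem.Int.mod x 10])
      = (pvX x k, (List.range (k+1)).map (pvPrice x)) := by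
  intro k
  induction k with
  | zero => rfl
  | succ k ih =>
    rw [Function.iterate_succ_apply', ih, pvGB]
    conv_rhs => rw [List.range_succ, List.map_append]
    rfl

lemma pvUp_small (x : Int) : ∀ (l : List Nat) (d : PySem.Dict (List Int) Int),
    (∀ k ∈ l, k < 3) → l.foldl (pvUp x) d = d := by
  intro l
  induction l with
  | nil => intro d _; rfl
  | cons h t ih =>
    intro d hall
    rw [List.foldl_cons, pvUp, if_neg (by have := hall h (by simp); omega)]
    exact ih d (fun k hk => hall k (by simp [hk]))

-- A's fold over all indices is the insert-if-absent fold over the pair list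
lemma A_pairs (x : Int) (m : Nat) :
    (List.range m).foldl (pvUp x) PySem.Dict.empty
      = (pvPairs x m).foldl pvIia PySem.Dict.empty := by
  rw [pvPairs, List.foldl_map]
  by_cases hm : 3 <= m
  · conv_lhs => rw [show m = 3 + (m-3) by omega]
    rw [List.range_add, List.foldl_append]
    have h3 : (List.range 3).foldl (pvUp x) (PySem.Dict.empty : PySem.Dict (List Int) Int)
        = PySem.Dict.empty := pvUp_small x _ _ (by intro k hk; exact List.mem_range.mp hk)
    rw [h3, List.foldl_map]
    refine PySem.List.foldl_congr_mem _ _ _ _ ?_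
    intro d k _
    rw [Nat.add_comm 3 k, pvUp, if_pos (by omega : 3 <= k + 3), pvIia, pvPair]
  · rw [show m - 3 = 0 by omega]
    rw [pvUp_small x _ _ (by intro k hk; have := List.mem_range.mp hk; omega)]
    rfl

-- items of an insert-if-absent fold = canonical first-occurrence dedup
lemma items_iia : ∀ (ps : List (List Int × Int)) (d : PySem.Dict (List Int) Int),
    (ps.foldl pvIia d).items = d.items ++ pvKeep d.keys ps := by
  intro ps
  induction ps with
  | nil => intro d; simp [pvKeep]
  | cons p t ih =>
    intro d
    rw [List.foldl_cons, pvIia, pvKeep]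
    by_cases hmem : p.1 ∈ d.keys
    · rw [if_pos (((PySem.Dict.contains_iff_mem_keys _ _).mpr hmem)), if_pos hmem, ih]
    · have hc : d.contains p.1 = false := by
        cases hcc : d.contains p.1
        · rfl
        · exact absurd (((PySem.Dict.contains_iff_mem_keys _ _).mp hcc)) hmem
      rw [if_neg (by simp [hc]), if_neg hmem, ih]
      rw [PySem.Dict.items_insert_of_not_contains _ _ hc,
          PySem.Dict.keys_insert_of_not_contains _ _ hc]
      simp

-- the backward overwrite pass: get? of the resulting dict is the first-occurrence index
lemma first_get : ∀ (ps : List (List Int × Int)) (s0 : Int)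
    (e : PySem.Dict (List Int) Int) (k : List Int),
    ((PySem.List.enumerate ps s0).foldr (fun q d => d.insert q.2.1 q.1) e).get? k
      = (match PySem.List.index? (ps.map Prod.fst) k with
         | some j => some (s0 + (j : Int))
         | none => e.get? k) := by
  intro ps
  induction ps with
  | nil =>
    intro s0 e k
    rw [PySem.List.enumerate_nil]
    simp [PySem.List.index?_eq_idxOf?]
  | cons p t ih =>
    intro s0 e k
    rw [PySem.List.enumerate_cons, List.foldr_cons, PySem.Dict.get?_insert]
    simp only [List.map_cons]
    by_cases hk : k = p.1
    · rw [if_pos hk, hk, PySem.List.index?_cons_self]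
      norm_num
    · have hne : p.1 ≠ k := fun h => hk h.symm
      rw [if_neg hk, PySem.List.index?_cons_of_ne _ hne, ih (s0 + 1) e k]
      cases PySem.List.index? (t.map Prod.fst) k with
      | none => simp
      | some j => simp; ring

-- the forward filtered emission equals the canonical first-occurrence dedup
lemma out_items (first : PySem.Dict (List Int) Int) (full : List (List Int × Int))
    (hF : ∀ k, first.get? k
      = (match PySem.List.index? (full.map Prod.fst) k with
         | some j => some ((j : Nat) : Int)
         | none => none)) :
    ∀ (ps pre : List (List Int × Int)) (d : PySem.Dict (List Int) Int),
      full = pre ++ ps →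
      (∀ s, s ∈ d.keys ↔ s ∈ pre.map Prod.fst) →
      ((PySem.List.enumerate ps (pre.length : Int)).foldl
          (fun d q => if first.get? q.2.1 == some q.1 then d.insert q.2.1 q.2.2 else d)
          d).items
        = d.items ++ pvKeep d.keys ps := by
  intro ps
  induction ps with
  | nil => intro pre d _ _; rw [PySem.List.enumerate_nil]; simp [pvKeep]
  | cons p t ih =>
    intro pre d hfull hkeys
    rw [PySem.List.enumerate_cons, List.foldl_cons, pvKeep]
    have hmapfull : full.map Prod.fst = pre.map Prod.fst ++ p.1 :: t.map Prod.fst := by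
      rw [hfull]; simp
    have hlen1 : ((pre.length : Int) + 1) = (((pre ++ [p]).length : Nat) : Int) := by
      simp
    by_cases hmem : p.1 ∈ pre.map Prod.fst
    · -- not the first occurrence: the filter drops the pair
      have hidx : PySem.List.index? (full.map Prod.fst) p.1
          = PySem.List.index? (pre.map Prod.fst) p.1 := by
        rw [hmapfull]
        exact PySem.List.index?_append_of_mem _ hmem
      have hcond : (first.get? p.1 == some ((pre.length : Nat) : Int)) = false := by
        rw [hF, hidx]
        obtain ⟨j, hj⟩ := Option.isSome_iff_exists.mp
          ((PySem.List.index?_isSome_iff _ _).mpr hmem)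
        obtain ⟨hjlt, -, -⟩ := PySem.List.getElem_of_index?_eq_some hj
        rw [hj]
        simp only [List.length_map] at hjlt
        simp
        omega

      rw [hcond]
      simp only [Bool.false_eq_true, if_false]
      rw [if_pos ((hkeys p.1).mpr hmem), hlen1]
      refine ih (pre ++ [p]) d (by rw [hfull]; simp) ?_
      intro s
      rw [hkeys s]
      simp only [List.map_append, List.mem_append, List.map_cons, List.map_nil,
        List.mem_cons, List.not_mem_nil, or_false]
      constructor
      · exact fun h => Or.inl h
      · rintro (h | h)
        · exact h
        · rw [h]; exact hmem
    · -- first occurrence: the filter keeps the pair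
      have hidx : PySem.List.index? (full.map Prod.fst) p.1 = some pre.length := by
        rw [hmapfull]
        refine (PySem.List.index?_eq_some_iff _ _ _).mpr ?_
        exact ⟨pre.map Prod.fst, t.map Prod.fst, rfl, by simp, hmem⟩
      have hcond : (first.get? p.1 == some ((pre.length : Nat) : Int)) = true := by
        rw [hF, hidx]; simp
      rw [hcond]
      simp only [if_true]
      have hc : d.contains p.1 = false := by
        cases hcc : d.contains p.1
        · rfl
        · exact absurd ((hkeys p.1).mp (((PySem.Dict.contains_iff_mem_keys _ _).mp hcc))) hmem
      rw [if_neg (fun h => hmem ((hkeys p.1).mp h)), hlen1]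
      rw [ih (pre ++ [p]) (d.insert p.1 p.2) (by rw [hfull]; simp) ?_]
      · rw [PySem.Dict.items_insert_of_not_contains _ _ hc,
            PySem.Dict.keys_insert_of_not_contains _ _ hc]
        simp
      · intro s
        rw [PySem.Dict.mem_keys_insert, hkeys s]
        simp only [List.map_append, List.mem_append, List.map_cons, List.map_nil,
          List.mem_cons, List.not_mem_nil, or_false]
        tauto

lemma B_deltas (x : Int) (n : Int) :
    (PySem.List.pyRange 0 n 1).map
      (fun i => PySem.List.pyGetD ((List.range (n.toNat+1)).map (pvPrice x)) (i + 1) 0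
              - PySem.List.pyGetD ((List.range (n.toNat+1)).map (pvPrice x)) i 0)
      = pvDts x n.toNat := by
  rw [PySem.List.pyRange_one, List.map_map]
  have h0 : (n - 0).toNat = n.toNat := by omega
  rw [h0, pvDts]
  apply List.map_congr_left
  intro k hk
  have hk' : k < n.toNat := List.mem_range.mp hk
  simp only [Function.comp_apply, zero_add]
  have hc : ((k : Int) + 1) = ((k + 1 : Nat) : Int) := by push_cast; ring
  rw [hc, PySem.List.pyGetD_natCast, PySem.List.pyGetD_natCast]
  rw [List.getD_eq_getElem?_getD, List.getD_eq_getElem?_getD]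
  rw [List.getElem?_map, List.getElem?_map]
  rw [List.getElem?_range (by omega), List.getElem?_range (by omega)]
  rfl

lemma B_pairs (x : Int) (n : Int) :
    (PySem.List.pyRange 0 (n - 3) 1).map
      (fun i => ([PySem.List.pyGetD (pvDts x n.toNat) i 0,
                  PySem.List.pyGetD (pvDts x n.toNat) (i + 1) 0,
                  PySem.List.pyGetD (pvDts x n.toNat) (i + 2) 0,
                  PySem.List.pyGetD (pvDts x n.toNat) (i + 3) 0],
                 PySem.List.pyGetD ((List.range (n.toNat+1)).map (pvPrice x)) (i + 4) 0))
      = pvPairs x n.toNat := by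
  rw [PySem.List.pyRange_one, List.map_map]
  have h3 : (n - 3 - 0).toNat = n.toNat - 3 := by omega
  rw [h3, pvPairs]
  apply List.map_congr_left
  intro k hk
  have hkm : k < n.toNat - 3 := List.mem_range.mp hk
  simp only [Function.comp_apply, zero_add]
  have e1 : ((k : Int) + 1) = ((k+1 : Nat) : Int) := by push_cast; ring
  have e2 : ((k : Int) + 2) = ((k+2 : Nat) : Int) := by push_cast; ring
  have e3 : ((k : Int) + 3) = ((k+3 : Nat) : Int) := by push_cast; ring
  have e4 : ((k : Int) + 4) = ((k+4 : Nat) : Int) := by push_cast; ring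
  rw [e1, e2, e3, e4]
  rw [PySem.List.pyGetD_natCast, PySem.List.pyGetD_natCast, PySem.List.pyGetD_natCast,
      PySem.List.pyGetD_natCast, PySem.List.pyGetD_natCast]
  have hd : ∀ j, j < n.toNat → (pvDts x n.toNat).getD j 0 = pvD x j := by
    intro j hj
    rw [pvDts, List.getD_eq_getElem?_getD, List.getElem?_map, List.getElem?_range hj]
    rfl
  rw [hd k (by omega), hd (k+1) (by omega), hd (k+2) (by omega), hd (k+3) (by omega)]
  have hp : ((List.range (n.toNat+1)).map (pvPrice x)).getD (k+4) 0 = pvPrice x (k+4) := by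
    rw [List.getD_eq_getElem?_getD, List.getElem?_map, List.getElem?_range (by omega)]
    rfl
  rw [hp, pvPair, pvSeq]
  rw [show k+3-3 = k by omega, show k+3-2 = k+1 by omega, show k+3-1 = k+2 by omega]

-- ===== VERDICT (by name: the statement is the Claim_ definition above) =====
theorem stepn_spec : Claim_equal_stepn := by
  intro x n _
  show stepn x n = stepn_alt x n
  have hm : (PySem.List.pyRange 0 n 1).length = n.toNat := by
    rw [PySem.List.length_pyRange_one]; omega
  -- A's side: items of the insert-if-absent fold over the pair list, i.e. pvKeep
  have hA : stepn x n = ((List.range n.toNat).foldl (pvUp x) PySem.Dict.empty).items := by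
    have h := foldl_iterate pvGA (PySem.List.pyRange 0 n 1) (x, ([] : List Int), PySem.Dict.empty)
    rw [hm, A_iter] at h
    exact congrArg (fun s => s.2.2.items) h
  rw [hA, A_pairs, items_iia]
  simp [PySem.Dict.keys_empty]
  -- B's side
  have hP := foldl_iterate pvGB (PySem.List.pyRange 0 n 1) (x, [PySem.Int.mod x 10])
  rw [hm, B_iter] at hP
  have hPrices : ((PySem.List.pyRange 0 n 1).foldl
      (fun (st : Int × List Int) _ => (stepB st.1, st.2 ++ [PySem.Int.mod (stepB st.1) 10]))
      (x, [PySem.Int.mod x 10])).2 = (List.range (n.toNat+1)).map (pvPrice x) :=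
    congrArg Prod.snd hP
  simp only [stepn_alt]
  rw [hPrices, B_deltas, B_pairs]
  have hF : ∀ k, ((PySem.List.enumerate (pvPairs x n.toNat) 0).reverse.foldl
      (fun (d : PySem.Dict (List Int) Int) q => d.insert q.2.1 q.1) PySem.Dict.empty).get? k
      = (match PySem.List.index? ((pvPairs x n.toNat).map Prod.fst) k with
         | some j => some ((j : Nat) : Int)
         | none => none) := by
    intro k
    rw [List.foldl_reverse, first_get]
    cases PySem.List.index? ((pvPairs x n.toNat).map Prod.fst) k with
    | none => simp [PySem.Dict.get?_empty]
    | some j => simp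
  have hout := out_items _ (pvPairs x n.toNat) hF (pvPairs x n.toNat) [] PySem.Dict.empty
    (by simp) (by simp [PySem.Dict.keys_empty])
  simp only [List.length_nil, Nat.cast_zero] at hout
  rw [hout]
  simp
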